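-- pv_equiv track=rewrite | github.com/SumitKPandit/foobar | fuel-injection-perfection/fuel-injection-perfection-v0.py | solution
-- ===== SOURCE A (Python) =====
-- def solution(n):
--     i = 0
--     if int(n) == 0:
--         return 1
--     while True:
--         if (2 ** i) >= int(n):
--             break
--         i += 1
--     high = 2 ** i
--     low = 2 ** (i - 1)
--     low_dif = int(n) - low
--     high_dif = high - int(n)
--     if high == int(n):
--         return i
--     if low_dif > high_dif:
--         return high_dif + i
--     else:
--         return low_dif + (i - 1)
-- ===== SOURCE B (Python) =====
-- def solution(n):
--     m = int(n)
--     if m == 0: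
--         return 1
--     if m == 1:
--         return 0
--     i = (m - 1).bit_length()
--     low_cost = (m - 2 ** (i - 1)) + (i - 1)
--     high_cost = (2 ** i - m) + i
--     return min(low_cost, high_cost)
-- ===== Notes on version B (the rewrite author's own statement) =====
-- stated objective: alternative
-- what changed: Replaces A's unbounded while-loop search for the smallest i with 2**i >= n and its three-way if/else by a closed form: i = (m-1).bit_length() and the answer as min of the two candidate costs.
-- outside the precondition, e.g. on solution('-3'): A returns -4.5, B returns -5; on solution('abc'): A raises ValueError, B raises ValueError
import Mathlib
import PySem

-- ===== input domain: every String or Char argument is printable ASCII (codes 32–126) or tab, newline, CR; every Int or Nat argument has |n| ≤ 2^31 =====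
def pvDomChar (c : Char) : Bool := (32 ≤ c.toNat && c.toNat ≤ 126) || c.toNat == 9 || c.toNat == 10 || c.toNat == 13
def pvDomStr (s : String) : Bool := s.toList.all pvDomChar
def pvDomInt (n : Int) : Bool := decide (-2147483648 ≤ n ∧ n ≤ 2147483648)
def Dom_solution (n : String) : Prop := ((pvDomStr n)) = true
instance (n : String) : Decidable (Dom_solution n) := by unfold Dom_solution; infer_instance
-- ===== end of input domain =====

-- B replaces A's while-loop power-of-two search and if/else by bit_length and a min of two costs (alternative formulation, same result on Pre_).

-- ===== PORT A =====
-- the 'while True: if 2**i >= int(n): break; i += 1' loop of A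
def solutionLoop (m : Int) (i : Nat) : Nat :=
  if m ≤ 2 ^ i then i else solutionLoop m (i + 1)
termination_by m.toNat - i
decreasing_by
  rename_i h
  rw [not_le] at h
  have h1 : (i : Int) < 2 ^ i := by exact_mod_cast Nat.lt_two_pow_self
  have h2 : (i : Int) < m := lt_trans h1 h
  omega

def solution (n : String) : Int :=
  match PySem.Int.ofStr? n with
  | none => 0  -- int(n) raises ValueError here; excluded by Pre_solution
  | some m =>
    if m = 0 then 1
    else
      let i := solutionLoop m 0
      let high : Int := 2 ^ i
      let low : Int := 2 ^ (i - 1)  -- i = 0 only when m ≤ 1; for m < 0 Python's 2**(-1) is the float 0.5, excluded by Pre_solution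
      let low_dif := m - low
      let high_dif := high - m
      if high = m then (i : Int)
      else if low_dif > high_dif then high_dif + (i : Int)
      else low_dif + ((i : Int) - 1)

-- ===== PORT B =====
def solution_alt (n : String) : Int :=
  match PySem.Int.ofStr? n with
  | none => 0  -- int(n) raises ValueError here; excluded by Pre_solution
  | some m =>
    if m = 0 then 1
    else if m = 1 then 0
    else
      let i := PySem.Int.bitLength (m - 1)   -- Python (m - 1).bit_length()
      let lowCost := (m - 2 ^ (i - 1)) + ((i : Int) - 1)
      let highCost := ((2 : Int) ^ i - m) + (i : Int)
      min lowCost highCost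

-- ===== PRECONDITION & SPEC =====
-- Pre_ excludes strings int() rejects (A raises ValueError) and strings parsing to a negative
-- integer, where A computes 2 ** (-1) = 0.5 and returns a float, not a value of the declared Int type.
def Pre_solution (n : String) : Prop := 0 ≤ (PySem.Int.ofStr? n).getD (-1)
instance (n : String) : Decidable (Pre_solution n) := by unfold Pre_solution; infer_instance
def pvWitness_solution : String := "5"

def Spec_solution (n : String) (out : Int) : Prop := out = solution_alt n
instance (n : String) (out : Int) : Decidable (Spec_solution n out) := by unfold Spec_solution; infer_instance

-- ===== CLAIM (what is proved, stated in full; the proofs are below) =====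
def Claim_equal_solution : Prop := ∀ (n : String), Dom_solution n → Pre_solution n → Spec_solution n (solution n)

-- ===== LEMMAS AND PROOFS =====

-- A's loop returns the least exponent t with m ≤ 2^t, provided it starts at or below t
lemma solutionLoop_eq (m : Int) (t : Nat) (h1 : m ≤ 2 ^ t)
    (h2 : ∀ j, j < t → (2 : Int) ^ j < m) :
    ∀ k i, i ≤ t → t - i ≤ k → solutionLoop m i = t := by
  intro k
  induction k with
  | zero =>
    intro i hi hk
    have : i = t := by omega
    subst this
    rw [solutionLoop, if_pos h1]
  | succ k ih =>
    intro i hi hk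
    rw [solutionLoop]
    by_cases hc : m ≤ 2 ^ i
    · rw [if_pos hc]
      by_contra hne
      exact absurd hc (not_le.mpr (h2 i (by omega)))
    · rw [if_neg hc]
      have hit : i ≠ t := by rintro rfl; exact hc h1
      exact ih (i + 1) (by omega) (by omega)

lemma main_eq (m : Int) (hm : 0 ≤ m) :
    (if m = 0 then (1 : Int)
     else
      let i := solutionLoop m 0
      let high : Int := 2 ^ i
      let low : Int := 2 ^ (i - 1)
      let low_dif := m - low
      let high_dif := high - m
      if high = m then (i : Int)
      else if low_dif > high_dif then high_dif + (i : Int)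
      else low_dif + ((i : Int) - 1)) =
    (if m = 0 then (1 : Int)
     else if m = 1 then 0
     else
      let i := PySem.Int.bitLength (m - 1)
      let lowCost := (m - 2 ^ (i - 1)) + ((i : Int) - 1)
      let highCost := ((2 : Int) ^ i - m) + (i : Int)
      min lowCost highCost) := by
  by_cases h0 : m = 0
  · simp [h0]
  by_cases h1 : m = 1
  · subst h1
    have hloop : solutionLoop 1 0 = 0 := by rw [solutionLoop]; norm_num
    simp [h0, hloop]
  -- now m ≥ 2
  have hm2 : 2 ≤ m := by omega
  set s := PySem.Int.bitLength (m - 1) with hs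
  have hne : m - 1 ≠ 0 := by omega
  have hnab : ((m - 1).natAbs : Int) = m - 1 := Int.natAbs_of_nonneg (by omega)
  have hup : m ≤ 2 ^ s := by
    have := PySem.Int.lt_two_pow_bitLength (m - 1)
    have : ((m - 1).natAbs : Int) < ((2 ^ s : Nat) : Int) := by exact_mod_cast this
    rw [hnab] at this
    push_cast at this
    omega
  have hs1 : 1 ≤ s := by
    by_contra hc
    have hz : s = 0 := by omega
    rw [hz] at hup
    norm_num at hup
    omega
  have hlow : (2 : Int) ^ (s - 1) < m := by
    have := PySem.Int.two_pow_bitLength_le (m - 1) hne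
    have h' : ((2 ^ (s - 1) : Nat) : Int) ≤ ((m - 1).natAbs : Int) := by exact_mod_cast this
    rw [hnab] at h'
    push_cast at h'
    omega
  have hloop : solutionLoop m 0 = s := by
    apply solutionLoop_eq m s hup _ s 0 (by omega) (by omega)
    intro j hj
    have hmono : (2 : Int) ^ j ≤ 2 ^ (s - 1) :=
      pow_le_pow_right₀ (by norm_num) (by omega)
    exact lt_of_le_of_lt hmono hlow
  simp only [if_neg h0, if_neg h1, hloop]
  have hq : (2 : Int) ^ s = 2 * 2 ^ (s - 1) := by
    conv_lhs => rw [show s = (s - 1) + 1 by omega]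
    ring
  have hp : (0 : Int) < 2 ^ (s - 1) := by positivity
  set p : Int := 2 ^ (s - 1) with hpdef
  rw [min_def]
  split_ifs <;> omega

-- ===== VERDICT (by name: the statement is the Claim_ definition above) =====
theorem solution_spec : Claim_equal_solution := by
  intro n _ hpre
  unfold Spec_solution solution solution_alt
  unfold Pre_solution at hpre
  cases h : PySem.Int.ofStr? n with
  | none => simp [h] at hpre
  | some m =>
    rw [h] at hpre
    exact main_eq m hpre
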